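-- pv_equiv track=rewrite | github.com/hnpl/project-euler | Problem-0601-to-0700/problem698.py | ordered_multi_set
-- ===== SOURCE A (Python) =====
-- from math import factorial
--
-- def ordered_multi_set(elements):
--     n = sum(elements)
--     ans = factorial(n)
--     for element in elements:
--         ans //= factorial(element)
--     s = set(elements)
--     n_distinct_elements = len(s) # 1->1, 2->3, 3->6
--     if n_distinct_elements == 1:
--         ans *= 1
--     elif n_distinct_elements == 2:
--         ans *= 3
--     elif n_distinct_elements == 3:
--         ans *= 6
--     return ans
-- ===== SOURCE B (Python) =====
-- from math import comb
--
-- def ordered_multi_set(elements):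
--     def multinomial(xs):
--         if not xs:
--             return 1
--         return comb(sum(xs), xs[0]) * multinomial(xs[1:])
--     factor = {1: 1, 2: 3, 3: 6}.get(len(set(elements)), 1)
--     return multinomial(elements) * factor
-- ===== Notes on version B (the rewrite author's own statement) =====
-- stated objective: alternative
-- what changed: Replaces the big-factorial-then-repeated-division loop by a recursive front-peeling product of binomial coefficients comb(sum(xs), xs[0]) * multinomial(xs[1:]), and the 1/3/6 if-chain by a dict lookup with default 1; values are identical.
import Mathlib
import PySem

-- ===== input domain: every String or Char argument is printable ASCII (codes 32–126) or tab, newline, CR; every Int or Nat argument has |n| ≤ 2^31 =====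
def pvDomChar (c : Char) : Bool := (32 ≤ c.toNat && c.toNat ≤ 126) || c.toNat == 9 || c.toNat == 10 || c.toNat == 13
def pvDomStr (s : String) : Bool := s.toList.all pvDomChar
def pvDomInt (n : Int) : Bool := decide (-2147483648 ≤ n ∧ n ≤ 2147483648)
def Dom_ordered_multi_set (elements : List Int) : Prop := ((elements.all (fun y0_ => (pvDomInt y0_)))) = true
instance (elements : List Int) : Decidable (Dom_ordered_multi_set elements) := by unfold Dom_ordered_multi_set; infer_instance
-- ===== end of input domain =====

-- B replaces the big-factorial-with-division loop by a recursive front-peeling product of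
-- binomial coefficients and the if-chain by a dict lookup (objective: alternative; same exact values).

-- ===== PORT A =====
-- math.factorial; exact for 0 ≤ n (it raises ValueError on negative n — excluded by Pre_).
def pyFactorial (n : Int) : Int := (Nat.factorial n.toNat : Int)

def ordered_multi_set (elements : List Int) : Int :=
  let n := elements.foldl (· + ·) 0
  let ans := pyFactorial n
  let ans := elements.foldl (fun a e => PySem.Int.floordiv a (pyFactorial e)) ans
  let n_distinct_elements := PySem.Set.len (PySem.Set.ofList elements)
  if n_distinct_elements = 1 then ans * 1
  else if n_distinct_elements = 2 then ans * 3
  else if n_distinct_elements = 3 then ans * 6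
  else ans

-- ===== PORT B =====
-- math.comb; exact for 0 ≤ k and 0 ≤ n (it raises ValueError on negatives — excluded by Pre_).
def pyComb (n k : Int) : Int := (Nat.choose n.toNat k.toNat : Int)

-- the inner recursive helper 'multinomial' of Source B: peel xs[0], recurse on xs[1:]
def multinomialB : List Int → Int
  | [] => 1
  | x :: rest => pyComb ((x :: rest).foldl (· + ·) 0) x * multinomialB rest

def ordered_multi_set_alt (elements : List Int) : Int :=
  let factor := (PySem.Dict.ofList [((1 : Int), (1 : Int)), (2, 3), (3, 6)]).getD
    (PySem.Set.len (PySem.Set.ofList elements)) 1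
  multinomialB elements * factor

-- ===== PRECONDITION & SPEC =====
-- math.factorial (in A) and math.comb (in B) raise ValueError on a negative argument,
-- so both programs raise as soon as any element is negative; Pre_ excludes exactly those inputs.
def Pre_ordered_multi_set (elements : List Int) : Prop := ∀ e ∈ elements, 0 ≤ e
instance (elements : List Int) : Decidable (Pre_ordered_multi_set elements) := by
  unfold Pre_ordered_multi_set; infer_instance

def pvWitness_ordered_multi_set : List Int := [1, 2, 2]

def Spec_ordered_multi_set (elements : List Int) (out : Int) : Prop := out = ordered_multi_set_alt elements
instance (elements : List Int) (out : Int) : Decidable (Spec_ordered_multi_set elements out) := by unfold Spec_ordered_multi_set; infer_instance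

-- ===== CLAIM (what is proved, stated in full; the proofs are below) =====
def Claim_equal_ordered_multi_set : Prop := ∀ (elements : List Int), Dom_ordered_multi_set elements → Pre_ordered_multi_set elements → Spec_ordered_multi_set elements (ordered_multi_set elements)

-- ===== LEMMAS AND PROOFS =====

-- the Nat-level value of B's recursion
def multNat : List ℕ → ℕ
  | [] => 1
  | x :: rest => Nat.choose (x + rest.sum) x * multNat rest

-- front-peeling telescopes: multNat l * ∏ e! = (Σ l)!
theorem multNat_mul_prod (l : List ℕ) :
    multNat l * (l.map Nat.factorial).prod = l.sum.factorial := by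
  induction l with
  | nil => simp [multNat]
  | cons x l ih =>
    have key : Nat.choose (x + l.sum) x * x.factorial * l.sum.factorial = (x + l.sum).factorial := by
      simpa using Nat.choose_mul_factorial_mul_factorial (Nat.le_add_right x l.sum)
    calc multNat (x :: l) * ((x :: l).map Nat.factorial).prod
        = Nat.choose (x + l.sum) x * x.factorial * (multNat l * (l.map Nat.factorial).prod) := by
          simp [multNat]; ring
      _ = Nat.choose (x + l.sum) x * x.factorial * l.sum.factorial := by rw [ih]
      _ = (x + l.sum).factorial := key
      _ = (x :: l).sum.factorial := by simp

theorem prodFactPos (l : List ℕ) : 0 < (l.map Nat.factorial).prod := by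
  induction l with
  | nil => simp
  | cons e l ih =>
    simp only [List.map_cons, List.prod_cons]
    exact Nat.mul_pos (Nat.factorial_pos e) ih

theorem prodFactDvd (l : List ℕ) : (l.map Nat.factorial).prod ∣ l.sum.factorial :=
  ⟨multNat l, by rw [mul_comm]; exact (multNat_mul_prod l).symm⟩

-- A's loop of exact divisions equals one division by the product of factorials.
theorem lemA (l : List ℕ) (M : ℕ) (h : (l.map Nat.factorial).prod ∣ M) :
    l.foldl (fun a e => a / e.factorial) M = M / (l.map Nat.factorial).prod := by
  induction l generalizing M with
  | nil => simp
  | cons e l ih =>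
    simp only [List.foldl_cons, List.map_cons, List.prod_cons] at h ⊢
    have h1 : e.factorial ∣ M := (dvd_mul_right e.factorial (l.map Nat.factorial).prod).trans h
    have h2 : (l.map Nat.factorial).prod ∣ M / e.factorial :=
      (Nat.dvd_div_iff_mul_dvd h1).mpr h
    rw [ih (M / e.factorial) h2, Nat.div_div_eq_div_mul]

-- the two Nat-level computations coincide
theorem natMain (l : List ℕ) :
    l.foldl (fun a e => a / e.factorial) l.sum.factorial = multNat l := by
  rw [lemA l _ (prodFactDvd l)]
  exact Nat.div_eq_of_eq_mul_left (prodFactPos l) (multNat_mul_prod l).symm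

-- cast bridges: the Int computations of the ports are the casts of the Nat ones
theorem castSumAux (l : List Int) (h : ∀ e ∈ l, 0 ≤ e) (c : Int) :
    l.foldl (· + ·) c = c + (((l.map Int.toNat).sum : ℕ) : Int) := by
  induction l generalizing c with
  | nil => simp
  | cons e l ih =>
    have he : (0 : Int) ≤ e := h e (List.mem_cons_self ..)
    simp only [List.foldl_cons, List.map_cons, List.sum_cons]
    rw [ih (fun x hx => h x (List.mem_cons_of_mem _ hx)) (c + e)]
    push_cast [Int.toNat_of_nonneg he]
    ring

theorem castSum (l : List Int) (h : ∀ e ∈ l, 0 ≤ e) :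
    l.foldl (· + ·) (0 : Int) = (((l.map Int.toNat).sum : ℕ) : Int) := by
  simpa using castSumAux l h 0

theorem castA (l : List Int) (M : ℕ) :
    l.foldl (fun a e => PySem.Int.floordiv a (pyFactorial e)) (M : Int)
      = (((l.map Int.toNat).foldl (fun a e => a / e.factorial) M : ℕ) : Int) := by
  induction l generalizing M with
  | nil => rfl
  | cons e l ih =>
    simp only [List.foldl_cons, List.map_cons]
    rw [show PySem.Int.floordiv (M : Int) (pyFactorial e)
          = ((M / e.toNat.factorial : ℕ) : Int) from PySem.Int.floordiv_natCast M e.toNat.factorial]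
    exact ih (M / e.toNat.factorial)

theorem castB (l : List Int) (h : ∀ e ∈ l, 0 ≤ e) :
    multinomialB l = ((multNat (l.map Int.toNat) : ℕ) : Int) := by
  induction l with
  | nil => rfl
  | cons x l ih =>
    have hx : (0 : Int) ≤ x := h x (List.mem_cons_self ..)
    have hrest : ∀ e ∈ l, (0 : Int) ≤ e := fun e he => h e (List.mem_cons_of_mem _ he)
    have hsum := castSum (x :: l) h
    simp only [multinomialB, multNat, List.map_cons]
    rw [hsum, ih hrest]
    simp only [List.map_cons, List.sum_cons, pyComb, Int.toNat_natCast]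
    push_cast
    ring

-- the 1/3/6 if-chain of A equals the dict lookup of B
theorem factorEq (ans : Int) (d : Int) :
    (if d = 1 then ans * 1 else if d = 2 then ans * 3 else if d = 3 then ans * 6 else ans)
      = ans * (PySem.Dict.ofList [((1 : Int), (1 : Int)), (2, 3), (3, 6)]).getD d 1 := by
  have key : (PySem.Dict.ofList [((1 : Int), (1 : Int)), (2, 3), (3, 6)]).getD d 1
      = if d = 1 then 1 else if d = 2 then 3 else if d = 3 then 6 else 1 := by
    have hit : (PySem.Dict.ofList [((1 : Int), (1 : Int)), (2, 3), (3, 6)]).items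
        = [(1, 1), (2, 3), (3, 6)] := by decide
    by_cases h1 : d = 1
    · subst h1; decide
    by_cases h2 : d = 2
    · subst h2; decide
    by_cases h3 : d = 3
    · subst h3; decide
    simp [PySem.Dict.getD, PySem.Dict.get?, hit, List.find?, h1, h2, h3,
      show ((1 : Int) == d) = false from by simp [Ne.symm h1],
      show ((2 : Int) == d) = false from by simp [Ne.symm h2],
      show ((3 : Int) == d) = false from by simp [Ne.symm h3]]
  rw [key]
  split_ifs <;> ring

-- ===== VERDICT (by name: the statement is the Claim_ definition above) =====
theorem ordered_multi_set_spec : Claim_equal_ordered_multi_set := by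
  intro elements _dom hpre
  unfold Spec_ordered_multi_set ordered_multi_set ordered_multi_set_alt
  have hsum := castSum elements hpre
  have hF : pyFactorial ((((elements.map Int.toNat).sum : ℕ)) : Int)
      = (((elements.map Int.toNat).sum.factorial : ℕ) : Int) := by
    simp only [pyFactorial, Int.toNat_natCast]
  simp only [hsum, hF, castA, natMain, castB elements hpre]
  exact factorEq _ _
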